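-- pv_equiv track=rewrite | github.com/Million-art/slack-bot | app/utils/helpers.py | transpose_data
-- ===== SOURCE A (Python) =====
-- from typing import List, Dict, Any, Optional
--
-- def transpose_data(data: List[List[str]]) -> List[List[str]]:
--     """
--     Transpose 2D data (swap rows and columns).
--
--     Args:
--         data (List[List[str]]): Data to transpose
--
--     Returns:
--         List[List[str]]: Transposed data
--     """
--     if not data:
--         return []
--
--     # Find the maximum row length
--     max_cols = max(len(row) for row in data) if data else 0
--
--     # Transpose the data
--     transposed = []
--     for col in range(max_cols):
--         new_row = []
--         for row in data:
--             if col < len(row):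
--                 new_row.append(row[col])
--             else:
--                 new_row.append('')
--         transposed.append(new_row)
--
--     return transposed
-- ===== SOURCE B (Python) =====
-- from typing import List
--
--
-- def transpose_data(data: List[List[str]]) -> List[List[str]]:
--     """Transpose 2D data (swap rows and columns), padding short rows with ''.
--
--     Single pass over the rows: columns are grown incrementally. Each row
--     extends every existing column (with '' where the row is too short) and
--     opens new, back-padded columns for its extra cells. No maximum row
--     length is ever computed and no cell is indexed by column position twice.
--     """
--     cols: List[List[str]] = []
--     seen = 0
--     for row in data:
--         for j, col in enumerate(cols):
--             col.append(row[j] if j < len(row) else '')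
--         for j in range(len(cols), len(row)):
--             cols.append([''] * seen + [row[j]])
--         seen += 1
--     return cols
-- ===== Notes on version B (the rewrite author's own statement) =====
-- stated objective: alternative
-- what changed: B makes a single pass over the rows, growing the list of columns incrementally (each row extends every existing column and opens new back-padded columns for its extra cells), instead of A's two-stage max-length computation followed by a column-indexed bounds-checked scan of all rows per column.
import Mathlib
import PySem

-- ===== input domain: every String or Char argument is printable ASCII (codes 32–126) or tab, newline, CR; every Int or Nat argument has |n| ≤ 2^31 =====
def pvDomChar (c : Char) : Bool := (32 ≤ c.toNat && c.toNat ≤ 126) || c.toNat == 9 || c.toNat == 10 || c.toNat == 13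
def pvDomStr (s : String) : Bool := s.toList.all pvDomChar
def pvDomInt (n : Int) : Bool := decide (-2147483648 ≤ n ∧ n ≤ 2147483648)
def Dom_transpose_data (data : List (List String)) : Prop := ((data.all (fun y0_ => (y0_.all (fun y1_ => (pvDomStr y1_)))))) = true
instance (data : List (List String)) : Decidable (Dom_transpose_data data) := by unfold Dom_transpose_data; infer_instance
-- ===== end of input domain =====

-- B: one pass over the rows growing the columns incrementally (each row extends
-- every existing column and opens new back-padded columns) instead of A's
-- max-length computation plus column-indexed bounds-checked scans.


-- ===== PORT A =====
def transpose_data (data : List (List String)) : List (List String) :=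
  if data.isEmpty then []
  else
    -- max(len(row) for row in data): data is nonempty here, lengths are ≥ 0,
    -- so Python's max equals the fold of max starting from 0
    let max_cols := (data.map (·.length)).foldl max 0
    (List.range max_cols).map (fun col =>
      data.map (fun row => if col < row.length then row.getD col "" else ""))

-- ===== PORT B =====
-- one iteration of B's row loop on the state (cols, seen);
-- `for j, col in enumerate(cols)` is zipIdx, `range(len(cols), len(row))` is range'
def pvStep (st : List (List String) × Nat) (row : List String) :
    List (List String) × Nat :=
  let cols := st.1
  let seen := st.2
  let cols1 := cols.zipIdx.map
    (fun cj => cj.1 ++ [if cj.2 < row.length then row.getD cj.2 "" else ""])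
  let cols2 := cols1 ++ (List.range' cols.length (row.length - cols.length)).map
    (fun j => List.replicate seen "" ++ [row.getD j ""])
  (cols2, seen + 1)

def transpose_data_alt (data : List (List String)) : List (List String) :=
  (data.foldl pvStep ([], 0)).1

-- ===== PRECONDITION & SPEC =====
def Spec_transpose_data (data : List (List String)) (out : List (List String)) : Prop := out = transpose_data_alt data
instance (data : List (List String)) (out : List (List String)) : Decidable (Spec_transpose_data data out) := by unfold Spec_transpose_data; infer_instance

-- ===== CLAIM =====
def Claim_equal_transpose_data : Prop := ∀ (data : List (List String)), Dom_transpose_data data → Spec_transpose_data data (transpose_data data)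

-- ===== LEMMAS AND PROOFS =====

def pvMaxLen : List (List String) → Nat
  | [] => 0
  | r :: rs => max r.length (pvMaxLen rs)

-- the column picked at index `col`
def pvCol (rows : List (List String)) (col : Nat) : List String :=
  rows.map (fun row => if col < row.length then row.getD col "" else "")

-- the transposed table of a row prefix (B's loop invariant / A's result)
def pvT (rows : List (List String)) : List (List String) :=
  (List.range (pvMaxLen rows)).map (pvCol rows)

theorem pvFoldl_max (data : List (List String)) :
    ∀ acc : Nat, (data.map (·.length)).foldl max acc = max acc (pvMaxLen data) := by
  induction data with
  | nil => intro acc; simp [pvMaxLen]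
  | cons r rs ih =>
    intro acc
    simp only [List.map_cons, List.foldl_cons, pvMaxLen, ih]
    omega

theorem pvMaxLen_append (rows : List (List String)) (row : List String) :
    pvMaxLen (rows ++ [row]) = max (pvMaxLen rows) row.length := by
  induction rows with
  | nil => simp [pvMaxLen]
  | cons r rs ih => simp only [List.cons_append, pvMaxLen, ih]; omega

theorem pvLen_le_maxLen (rows : List (List String)) (row : List String)
    (h : row ∈ rows) : row.length ≤ pvMaxLen rows := by
  induction rows with
  | nil => simp at h
  | cons r rs ih =>
    rcases List.mem_cons.mp h with h | h
    · subst h; simp [pvMaxLen]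
    · have := ih h; simp only [pvMaxLen]; omega

theorem pvCol_big (rows : List (List String)) (c : Nat) (h : pvMaxLen rows ≤ c) :
    pvCol rows c = List.replicate rows.length "" := by
  unfold pvCol
  rw [List.eq_replicate_iff]
  refine ⟨by simp, ?_⟩
  intro b hb
  rcases List.mem_map.mp hb with ⟨row, hrow, hb⟩
  have := pvLen_le_maxLen rows row hrow
  rw [if_neg (by omega)] at hb
  exact hb.symm

theorem pvCol_append (rows : List (List String)) (row : List String) (c : Nat) :
    pvCol (rows ++ [row]) c =
      pvCol rows c ++ [if c < row.length then row.getD c "" else ""] := by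
  simp [pvCol]

theorem pvZipIdx_range_map {α : Type} (m : Nat) (g : Nat → α) :
    ((List.range m).map g).zipIdx = (List.range m).map (fun j => (g j, j)) := by
  apply List.ext_getElem
  · simp
  · intro i h1 h2
    simp

theorem pvStep_T (rows : List (List String)) (row : List String) :
    pvStep (pvT rows, rows.length) row = (pvT (rows ++ [row]), rows.length + 1) := by
  unfold pvStep pvT
  simp only
  refine Prod.ext ?_ rfl
  simp only [pvZipIdx_range_map, List.map_map, List.length_map, List.length_range,
    pvMaxLen_append]
  have hcol : ∀ c ∈ List.range (pvMaxLen rows),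
      ((fun cj : List String × Nat =>
          cj.1 ++ [if cj.2 < row.length then row.getD cj.2 "" else ""]) ∘
        (fun j => (pvCol rows j, j))) c
      = pvCol (rows ++ [row]) c := by
    intro c _
    simp [pvCol_append, Function.comp]
  by_cases h : row.length ≤ pvMaxLen rows
  · have : row.length - pvMaxLen rows = 0 := by omega
    rw [this]
    simp only [List.range'_zero, List.map_nil, List.append_nil,
      Nat.max_eq_left h]
    exact List.map_congr_left hcol
  · rw [not_le] at h
    have hsplit : List.range (max (pvMaxLen rows) row.length) =
        List.range (pvMaxLen rows) ++
          List.range' (pvMaxLen rows) (row.length - pvMaxLen rows) := by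
      rw [Nat.max_eq_right (le_of_lt h), List.range_eq_range',
        show row.length = pvMaxLen rows + (row.length - pvMaxLen rows) by omega,
        ← List.range'_append, List.range_eq_range']
      norm_num
    rw [hsplit, List.map_append]
    congr 1
    · exact List.map_congr_left hcol
    · apply List.map_congr_left
      intro c hc
      have hc' := List.mem_range'_1.mp hc
      rw [pvCol_append, pvCol_big rows c hc'.1, if_pos (by omega)]

theorem pvFoldl_T (data : List (List String)) :
    ∀ rows : List (List String),
      data.foldl pvStep (pvT rows, rows.length) = (pvT (rows ++ data), rows.length + data.length) := by
  induction data with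
  | nil => intro rows; simp
  | cons d ds ih =>
    intro rows
    rw [List.foldl_cons, pvStep_T,
      show rows.length + 1 = (rows ++ [d]).length by simp, ih (rows ++ [d])]
    simp only [List.append_assoc, List.singleton_append, List.length_cons, Prod.mk.injEq]
    refine ⟨trivial, by simp; omega⟩

-- ===== VERDICT =====
theorem transpose_data_spec : Claim_equal_transpose_data := by
  intro data _
  unfold Spec_transpose_data transpose_data transpose_data_alt
  have hB : (data.foldl pvStep ([], 0)).1 = pvT data := by
    have := pvFoldl_T data []
    simp only [List.nil_append, List.length_nil] at this
    rw [show (([], 0) : List (List String) × Nat) = (pvT [], ([]: List (List String)).length) by rfl]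
    rw [show (([]: List (List String)).length) = 0 from rfl, this]
  rw [hB]
  by_cases h : data = []
  · subst h; simp [pvT, pvMaxLen]
  · simp only [List.isEmpty_iff, h, if_false]
    rw [pvFoldl_max data 0]
    simp [pvT, pvCol]
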